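-- pv_equiv track=rewrite | github.com/arch1en/uedt | UEDT.py | ParseLaunchMode
-- ===== SOURCE A (Python) =====
-- from enum import IntFlag, auto
--
-- class LaunchMode(IntFlag):
--     Opti = auto()
--     Trace = auto()
--     Debug = auto()
--
-- def ParseLaunchMode(Mode):
--     PreparedString = "".join(Mode.split()).lower()
--     Modes = PreparedString.split("|")
--
--     Result = 0
--
--     for e in LaunchMode:
--         if e.name.lower() in Modes:
--             Result |= e.value
--
--     return Result
-- ===== SOURCE B (Python) =====
-- from enum import IntFlag, auto
--
-- class LaunchMode(IntFlag):
--     Opti = auto()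
--     Trace = auto()
--     Debug = auto()
--
-- _TABLE = {e.name.lower(): e.value for e in LaunchMode}
--
-- def ParseLaunchMode(Mode):
--     # Single character-level pass: skip whitespace, lowercase, cut tokens at '|',
--     # OR-ing each finished token's flag value from a prebuilt table.
--     result = 0
--     tok = ""
--     for c in Mode:
--         if c.isspace():
--             continue
--         if c == "|":
--             result |= _TABLE.get(tok, 0)
--             tok = ""
--         else:
--             tok += c.lower()
--     return result | _TABLE.get(tok, 0)
-- ===== Notes on version B (the rewrite author's own statement) =====
-- stated objective: alternative
-- what changed: B replaces A's staged pipeline (whitespace split, join, lower, split on pipes, then a scan of the enum with a membership test per member) by a single character-level pass that skips whitespace, lowercases, cuts tokens at the separator and ORs each finished token's value from a prebuilt name-to-value table.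
import Mathlib
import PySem

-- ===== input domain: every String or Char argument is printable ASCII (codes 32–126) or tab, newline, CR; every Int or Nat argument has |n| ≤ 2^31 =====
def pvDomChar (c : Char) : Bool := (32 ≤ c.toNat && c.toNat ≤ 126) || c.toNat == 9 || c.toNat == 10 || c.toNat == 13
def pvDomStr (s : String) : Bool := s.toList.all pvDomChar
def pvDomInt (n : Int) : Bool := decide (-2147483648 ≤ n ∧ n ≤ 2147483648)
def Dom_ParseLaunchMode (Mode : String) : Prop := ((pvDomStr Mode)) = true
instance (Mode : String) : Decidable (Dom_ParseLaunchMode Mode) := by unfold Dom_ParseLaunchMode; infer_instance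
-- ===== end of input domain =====

-- B replaces A's staged split/join/lower/split pipeline plus enum scan by one
-- character-level pass with a token accumulator and a prebuilt name→value table
-- (objective: alternative).

-- ===== PORT A =====
-- LaunchMode members as (lowercased name, value) pairs, in enum order: Opti=1, Trace=2, Debug=4.
def launchModeMembers : List (List Char × Int) :=
  [("opti".toList, 1), ("trace".toList, 2), ("debug".toList, 4)]

def ParseLaunchMode (Mode : String) : Int :=
  -- PreparedString = "".join(Mode.split()).lower(); Modes = PreparedString.split("|")
  let prepared := PySem.Str.lower (PySem.Str.join "" (PySem.Str.split₀ Mode))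
  let modes := PySem.Chars.splitOn prepared.toList "|".toList
  -- for e in LaunchMode: if e.name.lower() in Modes: Result |= e.value
  launchModeMembers.foldl (fun r e => if e.1 ∈ modes then PySem.Int.bor r e.2 else r) 0

-- ===== PORT B =====
-- _TABLE = {e.name.lower(): e.value for e in LaunchMode}
def launchModeTable : PySem.Dict (List Char) Int :=
  PySem.Dict.ofList [("opti".toList, 1), ("trace".toList, 2), ("debug".toList, 4)]

def ParseLaunchMode_alt (Mode : String) : Int :=
  -- one pass over the characters: state = (result so far, current token)
  let st := Mode.toList.foldl
    (fun (st : Int × List Char) c =>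
      if PySem.Chars.isspace c then st                             -- if c.isspace(): continue
      else if c = '|' then                                         -- if c == "|": result |= _TABLE.get(tok,0); tok = ""
        (PySem.Int.bor st.1 (launchModeTable.getD st.2 0), [])
      else (st.1, st.2 ++ [PySem.Chars.lowerChar c]))              -- else: tok += c.lower()
    (0, [])
  PySem.Int.bor st.1 (launchModeTable.getD st.2 0)                 -- return result | _TABLE.get(tok, 0)

-- ===== PRECONDITION & SPEC =====
def Spec_ParseLaunchMode (Mode : String) (out : Int) : Prop := out = ParseLaunchMode_alt Mode
instance (Mode : String) (out : Int) : Decidable (Spec_ParseLaunchMode Mode out) := by unfold Spec_ParseLaunchMode; infer_instance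

-- ===== CLAIM (what is proved, stated in full; the proofs are below) =====
def Claim_equal_ParseLaunchMode : Prop := ∀ (Mode : String), Dom_ParseLaunchMode Mode → Spec_ParseLaunchMode Mode (ParseLaunchMode Mode)

-- ===== LEMMAS AND PROOFS =====

-- named step functions of B's character scan, for the proofs below
def scanStep (st : Int × List Char) (c : Char) : Int × List Char :=
  if PySem.Chars.isspace c then st
  else if c = '|' then (PySem.Int.bor st.1 (launchModeTable.getD st.2 0), [])
  else (st.1, st.2 ++ [PySem.Chars.lowerChar c])

-- the same scan restricted to a whitespace-free, already lowercased list
def scanStep' (st : Int × List Char) (c : Char) : Int × List Char :=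
  if c = '|' then (PySem.Int.bor st.1 (launchModeTable.getD st.2 0), [])
  else (st.1, st.2 ++ [c])

def finalize (st : Int × List Char) : Int :=
  PySem.Int.bor st.1 (launchModeTable.getD st.2 0)

def tokStep (r : Int) (t : List Char) : Int := PySem.Int.bor r (launchModeTable.getD t 0)

-- The result as a function of the three membership bits.
def pvBits (b1 b2 b3 : Bool) : Int :=
  PySem.Int.bor (PySem.Int.bor (if b1 then (1 : Int) else 0) (if b2 then (2 : Int) else 0))
    (if b3 then (4 : Int) else 0)

lemma lowerChar_eq_bar (c : Char) : (PySem.Chars.lowerChar c = '|') ↔ (c = '|') := by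
  unfold PySem.Chars.lowerChar
  by_cases h : PySem.Chars.isupper c = true
  · simp only [h, if_pos]
    constructor
    · intro he
      exfalso
      have hb : ('A' ≤ c ∧ c ≤ 'Z') := by
        unfold PySem.Chars.isupper at h; simpa using h
      have h65 : 65 ≤ c.toNat := hb.1
      have h90 : c.toNat ≤ 90 := hb.2
      have hval : (c.toNat + 32).isValidChar := by
        left; omega
      have hh : (Char.ofNat (c.toNat + 32)).toNat = c.toNat + 32 := by
        rw [Char.toNat_ofNat, if_pos hval]
      rw [he] at hh
      simp only [show ('|' : Char).toNat = 124 from rfl] at hh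
      omega
    · intro he
      exfalso
      subst he
      exact absurd h (by decide)
  · rw [if_neg h]

lemma scan_clean (s : List Char) : ∀ st : Int × List Char,
    s.foldl scanStep st
      = ((s.filter (fun c => !PySem.Chars.isspace c)).map PySem.Chars.lowerChar).foldl scanStep' st := by
  induction s with
  | nil => intro st; rfl
  | cons c rest ih =>
    intro st
    by_cases hs : PySem.Chars.isspace c = true
    · have hs' : (!PySem.Chars.isspace c) = false := by simp [hs]
      simp only [List.foldl_cons, List.filter_cons, hs', Bool.false_eq_true, if_neg,
        not_false_eq_true]
      rw [show scanStep st c = st from by unfold scanStep; rw [if_pos hs]]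
      exact ih st
    · have hs' : (!PySem.Chars.isspace c) = true := by simp [hs]
      simp only [List.foldl_cons, List.filter_cons, hs', if_pos, List.map_cons]
      rw [ih]
      congr 1
      unfold scanStep scanStep'
      rw [if_neg hs]
      by_cases hb : c = '|'
      · rw [if_pos hb, if_pos ((lowerChar_eq_bar c).mpr hb)]
      · rw [if_neg hb, if_neg (fun h => hb ((lowerChar_eq_bar c).mp h))]

-- character scan over a cleaned list = token fold over splitOn _ "|"
lemma scan_splitOn_go (fuel : Nat) : ∀ (l cur : List Char) (acc : List (List Char)) (r : Int),
    l.length < fuel →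
    (PySem.Chars.splitOn.go ['|'] fuel l cur acc).foldl tokStep r
      = finalize (l.foldl scanStep' (acc.reverse.foldl tokStep r, cur.reverse)) := by
  induction fuel with
  | zero => intro l cur acc r h; omega
  | succ f ih =>
    intro l cur acc r h
    cases l with
    | nil =>
      simp [PySem.Chars.splitOn.go, finalize, tokStep]
    | cons c rest =>
      rw [show PySem.Chars.splitOn.go ['|'] (f+1) (c :: rest) cur acc
          = (if (['|'] : List Char).isPrefixOf (c :: rest) = true then
              PySem.Chars.splitOn.go ['|'] f (List.drop (['|'] : List Char).length (c :: rest)) [] (cur.reverse :: acc)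
            else PySem.Chars.splitOn.go ['|'] f rest (c :: cur) acc) from rfl]
      have hlen : rest.length < f := by simpa using h
      by_cases hb : c = '|'
      · subst hb
        have hp : (['|'] : List Char).isPrefixOf ('|' :: rest) = true := by
          simp [List.isPrefixOf]
        rw [if_pos hp]
        simp only [List.length_cons, List.length_nil, List.drop_succ_cons, List.drop_zero]
        rw [ih rest [] (cur.reverse :: acc) r hlen]
        have hstep : scanStep' (acc.reverse.foldl tokStep r, cur.reverse) '|'
            = (tokStep (acc.reverse.foldl tokStep r) cur.reverse, []) := by
          unfold scanStep' tokStep; rw [if_pos rfl]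
        simp only [List.reverse_cons, List.foldl_append, List.foldl_cons, List.foldl_nil,
          List.reverse_nil, hstep]
      · have hp : (['|'] : List Char).isPrefixOf (c :: rest) = false := by
          simp [List.isPrefixOf]
          intro hc; exact absurd hc.symm hb
        rw [if_neg (by simp [hp])]
        rw [ih rest (c :: cur) acc r hlen]
        have hstep : scanStep' (acc.reverse.foldl tokStep r, cur.reverse) c
            = (acc.reverse.foldl tokStep r, cur.reverse ++ [c]) := by
          unfold scanStep'; rw [if_neg hb]
        simp only [List.foldl_cons, List.reverse_cons, hstep]

lemma scan_splitOn (s : List Char) :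
    (PySem.Chars.splitOn s ['|']).foldl tokStep 0
      = finalize (s.foldl scanStep' (0, [])) := by
  have h := scan_splitOn_go (s.length + 1) s [] [] 0 (by omega)
  simpa [PySem.Chars.splitOn] using h

-- join with empty separator is flatten
lemma join_nil_flatten (xs : List (List Char)) :
    PySem.Chars.join [] xs = xs.flatten := by
  unfold PySem.Chars.join List.intercalate
  induction xs with
  | nil => rfl
  | cons a t ih =>
    cases t with
    | nil => rfl
    | cons b t' =>
      rw [show List.intersperse ([] : List Char) (a :: b :: t')
          = a :: [] :: List.intersperse [] (b :: t') from rfl]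
      simp only [List.flatten_cons, List.nil_append] at ih ⊢
      rw [ih]

-- "".join(s.split()) removes exactly the whitespace characters
lemma join_split₀_go (s : List Char) : ∀ (cur : List Char) (acc : List (List Char)),
    (PySem.Chars.split₀.go s cur acc).flatten
      = acc.reverse.flatten ++ cur.reverse ++ s.filter (fun c => !PySem.Chars.isspace c) := by
  induction s with
  | nil =>
    intro cur acc
    by_cases hc : cur.isEmpty = true
    · rw [show PySem.Chars.split₀.go [] cur acc = acc.reverse from by
        unfold PySem.Chars.split₀.go; simp [hc]]
      have : cur = [] := by simpa [List.isEmpty_iff] using hc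
      simp [this]
    · rw [show PySem.Chars.split₀.go [] cur acc = (cur.reverse :: acc).reverse from by
        unfold PySem.Chars.split₀.go; simp [hc]]
      simp
  | cons c rest ih =>
    intro cur acc
    by_cases hs : PySem.Chars.isspace c = true
    · have hs' : (!PySem.Chars.isspace c) = false := by simp [hs]
      by_cases hc : cur.isEmpty = true
      · rw [show PySem.Chars.split₀.go (c :: rest) cur acc
            = PySem.Chars.split₀.go rest [] acc from by
          rw [PySem.Chars.split₀.go]; rw [if_pos hs, if_pos hc]]
        have hcur : cur = [] := by simpa [List.isEmpty_iff] using hc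
        rw [ih [] acc]
        simp [hcur, hs']
      · rw [show PySem.Chars.split₀.go (c :: rest) cur acc
            = PySem.Chars.split₀.go rest [] (cur.reverse :: acc) from by
          rw [PySem.Chars.split₀.go]; rw [if_pos hs, if_neg hc]]
        rw [ih [] (cur.reverse :: acc)]
        simp [hs']
    · have hs' : (!PySem.Chars.isspace c) = true := by simp [hs]
      rw [show PySem.Chars.split₀.go (c :: rest) cur acc
          = PySem.Chars.split₀.go rest (c :: cur) acc from by
        rw [PySem.Chars.split₀.go]; rw [if_neg hs]]
      rw [ih (c :: cur) acc]
      simp [hs']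

lemma prepared_eq (Mode : String) :
    (PySem.Str.lower (PySem.Str.join "" (PySem.Str.split₀ Mode))).toList
      = (Mode.toList.filter (fun c => !PySem.Chars.isspace c)).map PySem.Chars.lowerChar := by
  rw [PySem.Str.toList_lower, PySem.Str.toList_join, PySem.Str.split₀_map_toList]
  rw [show ("" : String).toList = [] from rfl, join_nil_flatten]
  rw [show PySem.Chars.split₀ Mode.toList = PySem.Chars.split₀.go Mode.toList [] [] from rfl]
  rw [join_split₀_go]
  simp [PySem.Chars.lower]

lemma tbl_eq (t : List Char) :
    launchModeTable.getD t 0 =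
      if t = "opti".toList then 1 else if t = "trace".toList then 2
      else if t = "debug".toList then 4 else 0 := by
  by_cases h1 : t = "opti".toList
  · subst h1; decide
  · by_cases h2 : t = "trace".toList
    · subst h2; decide
    · by_cases h3 : t = "debug".toList
      · subst h3; decide
      · have e1 : ((['o','p','t','i'] : List Char) == t) = false := by
          simpa using Ne.symm h1
        have e2 : ((['t','r','a','c','e'] : List Char) == t) = false := by
          simpa using Ne.symm h2
        have e3 : ((['d','e','b','u','g'] : List Char) == t) = false := by
          simpa using Ne.symm h3
        simp only [if_neg h1, if_neg h2, if_neg h3]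
        simp [launchModeTable, PySem.Dict.ofList, PySem.Dict.getD, PySem.Dict.get?,
              PySem.Dict.empty, PySem.Dict.update, PySem.Dict.insert, List.find?, e1, e2, e3]

lemma a_fold (M : List (List Char)) :
    launchModeMembers.foldl (fun r e => if e.1 ∈ M then PySem.Int.bor r e.2 else r) 0
      = pvBits (decide ("opti".toList ∈ M)) (decide ("trace".toList ∈ M)) (decide ("debug".toList ∈ M)) := by
  by_cases h1 : "opti".toList ∈ M <;> by_cases h2 : "trace".toList ∈ M <;>
    by_cases h3 : "debug".toList ∈ M <;>
    simp only [show ("opti".toList : List Char) = ['o','p','t','i'] from rfl,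
               show ("trace".toList : List Char) = ['t','r','a','c','e'] from rfl,
               show ("debug".toList : List Char) = ['d','e','b','u','g'] from rfl] at h1 h2 h3 <;>
    simp [launchModeMembers, List.foldl, pvBits, h1, h2, h3] <;> decide

lemma b_fold (M : List (List Char)) : ∀ b1 b2 b3 : Bool,
    M.foldl tokStep (pvBits b1 b2 b3)
      = pvBits (b1 || decide ("opti".toList ∈ M)) (b2 || decide ("trace".toList ∈ M))
          (b3 || decide ("debug".toList ∈ M)) := by
  induction M with
  | nil => intro b1 b2 b3; simp
  | cons t M ih =>
    intro b1 b2 b3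
    have step : tokStep (pvBits b1 b2 b3) t
        = pvBits (b1 || decide ("opti".toList = t)) (b2 || decide ("trace".toList = t))
            (b3 || decide ("debug".toList = t)) := by
      unfold tokStep
      rw [tbl_eq]
      by_cases h1 : "opti".toList = t
      · subst h1; cases b1 <;> cases b2 <;> cases b3 <;> decide
      · by_cases h2 : "trace".toList = t
        · subst h2; cases b1 <;> cases b2 <;> cases b3 <;> decide
        · by_cases h3 : "debug".toList = t
          · subst h3; cases b1 <;> cases b2 <;> cases b3 <;> decide
          · rw [if_neg (fun h => h1 h.symm), if_neg (fun h => h2 h.symm),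
                if_neg (fun h => h3 h.symm)]
            simp only [show ("opti".toList : List Char) = ['o','p','t','i'] from rfl,
                       show ("trace".toList : List Char) = ['t','r','a','c','e'] from rfl,
                       show ("debug".toList : List Char) = ['d','e','b','u','g'] from rfl] at h1 h2 h3
            simp [h1, h2, h3]
    rw [List.foldl_cons, step, ih]
    simp only [List.mem_cons, Bool.decide_or, Bool.or_assoc]

lemma b_fold_zero (M : List (List Char)) :
    M.foldl tokStep 0
      = pvBits (decide ("opti".toList ∈ M)) (decide ("trace".toList ∈ M)) (decide ("debug".toList ∈ M)) := by
  have h := b_fold M false false false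
  simpa [show pvBits false false false = 0 from by simp [pvBits]] using h

-- ===== VERDICT (by name: the statement is the Claim_ definition above) =====
theorem ParseLaunchMode_spec : Claim_equal_ParseLaunchMode := by
  intro Mode _
  unfold Spec_ParseLaunchMode ParseLaunchMode ParseLaunchMode_alt
  rw [show "|".toList = ['|'] from rfl]
  rw [show (fun (st : Int × List Char) c =>
      if PySem.Chars.isspace c then st
      else if c = '|' then (PySem.Int.bor st.1 (launchModeTable.getD st.2 0), [])
      else (st.1, st.2 ++ [PySem.Chars.lowerChar c])) = scanStep from rfl]
  rw [scan_clean, ← prepared_eq]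
  rw [a_fold, ← b_fold_zero, scan_splitOn]
  rfl
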